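-- pv_equiv track=rewrite | github.com/fzhulitov/rules | ruls/rules.py | from_row_to_dict
-- ===== SOURCE A (Python) =====
-- from itertools import combinations
--
-- def from_row_to_dict(inrow, expl='Survived') -> dict:
--     if expl in inrow.keys():
--         ab = inrow[expl]
--         del inrow[expl]
--     else:
--         ab = None
--     fulllist = []
--     for i in range(1,len(inrow)+1):
--         data = list(combinations(inrow.items(), i))
--         fulllist += data
--     outdict = dict.fromkeys(fulllist, ab)
--     return outdict
-- ===== SOURCE B (Python) =====
-- def _subsets(items):
--     if not items:
--         return [()]
--     rest = _subsets(items[1:])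
--     return [(items[0],) + s for s in rest] + rest
--
-- def from_row_to_dict(inrow, expl='Survived') -> dict:
--     ab = inrow.pop(expl, None)
--     groups = {}
--     for s in _subsets(list(inrow.items())):
--         groups.setdefault(len(s), []).append(s)
--     return {s: ab for k in range(1, len(inrow) + 1) for s in groups.get(k, [])}
-- ===== Notes on version B (the rewrite author's own statement) =====
-- stated objective: alternative
-- what changed: A calls itertools.combinations once per subset size inside a size loop; B builds the whole power set once by an include/exclude recursion over the items, groups the subsets by length into a dict in one pass, and emits the groups for sizes 1..n.
import Mathlib
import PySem

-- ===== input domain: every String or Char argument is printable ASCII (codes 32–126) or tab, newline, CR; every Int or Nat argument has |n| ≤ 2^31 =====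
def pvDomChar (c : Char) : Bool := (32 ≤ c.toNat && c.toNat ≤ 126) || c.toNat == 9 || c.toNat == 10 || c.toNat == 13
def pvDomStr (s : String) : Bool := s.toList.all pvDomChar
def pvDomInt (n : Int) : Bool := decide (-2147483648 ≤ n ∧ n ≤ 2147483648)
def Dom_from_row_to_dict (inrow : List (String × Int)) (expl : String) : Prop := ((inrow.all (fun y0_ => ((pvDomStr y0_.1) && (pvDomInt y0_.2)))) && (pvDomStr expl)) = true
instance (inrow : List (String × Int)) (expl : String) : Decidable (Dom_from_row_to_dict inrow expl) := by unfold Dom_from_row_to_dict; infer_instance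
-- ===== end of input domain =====

-- B replaces A's per-size itertools.combinations loop by one include/exclude recursion that builds
-- the whole power set, then groups the subsets by length in a single pass (objective: alternative algorithm).
-- Like A, B removes expl from the caller's dict in place; equivalence here is about the return value.

-- ===== PORT A =====
-- itertools.combinations(xs, k), transliterated (subsets in Python's order)
def pyCombinations (xs : List (String × Int)) (k : Nat) : List (List (String × Int)) :=
  match k, xs with
  | 0, _ => [[]]
  | _ + 1, [] => []
  | k + 1, x :: rest => (pyCombinations rest k).map (x :: ·) ++ pyCombinations rest (k + 1)

def from_row_to_dict (inrow : List (String × Int)) (expl : String) : List (List (String × Int) × Option Int) :=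
  let d0 : PySem.Dict String Int := PySem.Dict.ofList inrow
  let p : Option Int × PySem.Dict String Int :=
    match d0.get? expl with
    | some v => (some v, d0.erase expl)
    | none => (none, d0)
  let ab := p.1
  let d := p.2
  let fulllist := (PySem.List.pyRange 1 ((d.size : Int) + 1) 1).foldl
      (fun acc i => acc ++ pyCombinations d.items i.toNat) ([] : List (List (String × Int)))
  (fulllist.foldl
      (fun (od : PySem.Dict (List (String × Int)) (Option Int)) k => od.insert k ab)
      PySem.Dict.empty).items

-- ===== PORT B =====
-- _subsets: all subsets of items (each in original item order) by include/exclude recursion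
def pySubsets : List (String × Int) → List (List (String × Int))
  | [] => [[]]
  | x :: rest => (pySubsets rest).map (x :: ·) ++ pySubsets rest

def from_row_to_dict_alt (inrow : List (String × Int)) (expl : String) : List (List (String × Int) × Option Int) :=
  let d0 : PySem.Dict String Int := PySem.Dict.ofList inrow
  let ab := d0.get? expl          -- inrow.pop(expl, None): value (or None) …
  let d := d0.erase expl          -- … and the key removed if present
  let groups : PySem.Dict Int (List (List (String × Int))) :=
    (pySubsets d.items).foldl
      (fun g s => g.modify ((s.length : Int)) [] (· ++ [s])) PySem.Dict.empty
  (PySem.Dict.ofList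
      ((PySem.List.pyRange 1 ((d.size : Int) + 1) 1).flatMap
        (fun k => (groups.getD k []).map (fun s => (s, ab))))).items

-- ===== PRECONDITION & SPEC =====
def Spec_from_row_to_dict (inrow : List (String × Int)) (expl : String) (out : List (List (String × Int) × Option Int)) : Prop := out = from_row_to_dict_alt inrow expl
instance (inrow : List (String × Int)) (expl : String) (out : List (List (String × Int) × Option Int)) : Decidable (Spec_from_row_to_dict inrow expl out) := by unfold Spec_from_row_to_dict; infer_instance

-- ===== CLAIM (what is proved, stated in full; the proofs are below) =====
def Claim_equal_from_row_to_dict : Prop := ∀ (inrow : List (String × Int)) (expl : String), Dom_from_row_to_dict inrow expl → Spec_from_row_to_dict inrow expl (from_row_to_dict inrow expl)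

-- ===== LEMMAS AND PROOFS =====

-- erasing an absent key is the identity
theorem erase_of_get?_none (d : PySem.Dict String Int) (k : String)
    (h : d.get? k = none) : d.erase k = d := by
  apply PySem.Dict.ext
  show d.items.filter _ = d.items
  apply List.filter_eq_self.mpr
  intro p hp
  have hk : k ∉ d.keys := (PySem.Dict.get?_eq_none_iff_not_mem_keys d k).mp h
  have : p.1 ≠ k := fun he => hk (he ▸ List.mem_map_of_mem hp)
  simp [this]

-- pyCombinations xs k is exactly the length-k slice of the include/exclude power set
theorem pyCombinations_eq_filter (xs : List (String × Int)) (k : Nat) :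
    pyCombinations xs k = (pySubsets xs).filter (fun s => s.length == k) := by
  induction xs generalizing k with
  | nil =>
    cases k with
    | zero => rfl
    | succ k => rfl
  | cons x rest ih =>
    cases k with
    | zero =>
      rw [pyCombinations, pySubsets, List.filter_append, List.filter_map, ← ih 0]
      simp [pyCombinations, Function.comp_def]
    | succ k =>
      rw [pyCombinations, pySubsets, List.filter_append, List.filter_map, ← ih (k + 1), ih k]
      congr 1
      congr 1
      apply List.filter_congr
      intro s _
      rw [Bool.eq_iff_iff]
      simp

-- pyRange 1 (n+1) 1 = [1, …, n] as Ints
theorem pyRange_one_succ (n : Nat) :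
    PySem.List.pyRange 1 ((n : Int) + 1) 1 = (List.range n).map (fun k => ((k + 1 : Nat) : Int)) := by
  induction n with
  | zero => simp [PySem.List.pyRange]
  | succ n ih =>
    have h1 : ((n : Int) + 1) + 1 = (((n + 1 : Nat) : Int) + 1) := by push_cast; ring
    rw [← h1, PySem.List.pyRange_one_succ_right (by omega : (1 : Int) ≤ (n : Int) + 1), ih,
      List.range_succ, List.map_append]
    push_cast
    simp

-- the grouping loop, read back at key k, is the length-k filter of the power set
theorem getD_groups (items : List (String × Int)) (k : Int) :
    ((pySubsets items).foldl
        (fun (g : PySem.Dict Int (List (List (String × Int)))) s =>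
          g.modify ((s.length : Int)) [] (· ++ [s])) PySem.Dict.empty).getD k []
      = (pySubsets items).filter (fun s => ((s.length : Int) == k)) := by
  have hm : ((pySubsets items).map (fun s => (((s.length : Int)), s))).foldl
      (fun (g : PySem.Dict Int (List (List (String × Int)))) p =>
        g.modify p.1 [] (· ++ [p.2])) PySem.Dict.empty
      = (pySubsets items).foldl
          (fun (g : PySem.Dict Int (List (List (String × Int)))) s =>
            g.modify ((s.length : Int)) [] (· ++ [s])) PySem.Dict.empty := by
    rw [List.foldl_map]
  rw [← hm, PySem.Dict.getD_foldl_modify_append]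
  simp [List.filter_map, Function.comp_def]

-- B's pair list is A's fulllist with each key paired with ab
theorem pairs_eq (items : List (String × Int)) (ab : Option Int) :
    (PySem.List.pyRange 1 ((items.length : Int) + 1) 1).flatMap
        (fun k => (((pySubsets items).foldl
            (fun (g : PySem.Dict Int (List (List (String × Int)))) s =>
              g.modify ((s.length : Int)) [] (· ++ [s])) PySem.Dict.empty).getD k []).map
          (fun s => (s, ab)))
      = ((PySem.List.pyRange 1 ((items.length : Int) + 1) 1).flatMap
          (fun i => pyCombinations items i.toNat)).map (fun s => (s, ab)) := by
  rw [List.map_flatMap]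
  apply List.flatMap_congr
  intro i hi
  rw [getD_groups]
  rw [pyRange_one_succ] at hi
  obtain ⟨k, _, rfl⟩ := List.mem_map.mp hi
  rw [pyCombinations_eq_filter items ((k + 1 : Nat) : Int).toNat]
  congr 1
  apply List.filter_congr
  intro s _
  rw [Bool.eq_iff_iff]
  simp
  omega

-- dict.fromkeys-style fold = dict literal of the mapped pairs
theorem foldl_insert_eq_ofList (l : List (List (String × Int))) (ab : Option Int) :
    l.foldl (fun (od : PySem.Dict (List (String × Int)) (Option Int)) k => od.insert k ab)
        PySem.Dict.empty
      = PySem.Dict.ofList (l.map (fun s => (s, ab))) := by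
  simp only [PySem.Dict.ofList, PySem.Dict.update, List.foldl_map]

-- ===== VERDICT (by name: the statement is the Claim_ definition above) =====
theorem from_row_to_dict_spec : Claim_equal_from_row_to_dict := by
  intro inrow expl _
  unfold Spec_from_row_to_dict from_row_to_dict from_row_to_dict_alt
  simp only
  set d0 : PySem.Dict String Int := PySem.Dict.ofList inrow with hd0
  have hp : (match d0.get? expl with
      | some v => ((some v : Option Int), d0.erase expl)
      | none => (none, d0)) = (d0.get? expl, d0.erase expl) := by
    cases h : d0.get? expl with
    | some v => rfl
    | none => simp [erase_of_get?_none d0 expl h]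
  rw [hp]
  simp only
  rw [PySem.List.foldl_append_eq_flatMap, List.nil_append,
    show ((d0.erase expl).size : Int) = ((d0.erase expl).items.length : Int) from rfl,
    pairs_eq, ← foldl_insert_eq_ofList]
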